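-- pv_equiv track=rewrite | github.com/Monnoroch/ColorHighlighter | ColorHighlighter.py | extract_import
-- ===== SOURCE A (Python) =====
-- def extract_import(line):
--     l = len(line)
--     if line.startswith("@require"):
--         i = len("@require")
--     else:
--         i = len("@import")
--     while i < l and line[i] not in "'\"":
--         i += 1
--     i += 1
--     start = i
--     if start >= l:
--         return None
--
--     while i < l and line[i] not in "'\"":
--         i += 1
--     end = i
--     if end >= l:
--         return None
--
--     return line[start:end]
-- ===== SOURCE B (Python) =====
-- def extract_import(line):
--     tail = line[8 if line.startswith("@require") else 7:]
--     norm = tail.replace('"', "'")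
--     _, sep1, rest = norm.partition("'")
--     if not sep1:
--         return None
--     content, sep2, _ = rest.partition("'")
--     if not sep2:
--         return None
--     return content
-- ===== Notes on version B (the rewrite author's own statement) =====
-- stated objective: simpler
-- what changed: Replaces A's two index-walking while-loops with string surgery: normalise both quote characters to one with replace, then peel the string apart with two str.partition calls and return the middle piece.
import Mathlib
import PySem

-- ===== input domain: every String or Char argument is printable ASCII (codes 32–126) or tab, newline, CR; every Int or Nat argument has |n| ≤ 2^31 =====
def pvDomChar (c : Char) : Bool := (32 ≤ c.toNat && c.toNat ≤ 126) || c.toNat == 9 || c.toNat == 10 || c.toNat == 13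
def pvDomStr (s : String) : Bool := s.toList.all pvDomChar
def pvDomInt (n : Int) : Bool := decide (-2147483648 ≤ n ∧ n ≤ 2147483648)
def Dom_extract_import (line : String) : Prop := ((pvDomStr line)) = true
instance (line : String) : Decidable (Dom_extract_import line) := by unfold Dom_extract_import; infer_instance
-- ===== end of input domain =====

-- B replaces A's index-walking while-loops by normalising both quote characters to one
-- and peeling the string apart with two str.partition calls (objective: simpler).

-- shared tiny predicate: c in "'\""
def isQuote (c : Char) : Bool := c = '\'' || c = '"'

-- ===== PORT A =====
-- while i < l and line[i] not in "'\"": i += 1   (i only grows and starts at 7/8 ≥ 0, so i : Nat)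
def scanQuote (cs : List Char) (l i : Nat) : Nat :=
  if _h : i < l then
    if isQuote (cs.getD i ' ') then i else scanQuote cs l (i + 1)
  else i
termination_by l - i

def extract_import (line : String) : Option String :=
  let cs := line.toList
  let l := cs.length
  -- i = len("@require") = 8 / len("@import") = 7
  let i0 : Nat := if PySem.Str.startswith line "@require" then 8 else 7
  let i1 := scanQuote cs l i0
  let start := i1 + 1
  if start ≥ l then none
  else
    let i2 := scanQuote cs l start
    if i2 ≥ l then none
    else some (String.ofList (PySem.List.slice cs (some (start : Int)) (some (i2 : Int))))

-- ===== PORT B =====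
-- tail.replace('"', "'") with single-character old/new is exactly a character map
def normQuote (c : Char) : Char := if c = '"' then '\'' else c

-- hand port of s.partition(q) for a single-character separator q, exact: Python returns
-- (before, q, after) at the first occurrence of q, or (s, '', '') when q is absent;
-- we encode the 'found' flag as the Option on the after-part.
def partChar (cs : List Char) (q : Char) : List Char × Option (List Char) :=
  match cs with
  | [] => ([], none)
  | c :: rest =>
    if c = q then ([], some rest)
    else
      let p := partChar rest q
      (c :: p.1, p.2)

def extract_import_alt (line : String) : Option String :=
  let tail := PySem.List.slice line.toList
      (some (if PySem.Str.startswith line "@require" then (8 : Int) else 7)) none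
  let norm := tail.map normQuote
  match partChar norm '\'' with
  | (_, none) => none
  | (_, some rest) =>
    match partChar rest '\'' with
    | (_, none) => none
    | (content, some _) => some (String.ofList content)

-- ===== PRECONDITION & SPEC =====
def Spec_extract_import (line : String) (out : Option String) : Prop := out = extract_import_alt line
instance (line : String) (out : Option String) : Decidable (Spec_extract_import line out) := by unfold Spec_extract_import; infer_instance

-- ===== CLAIM (what is proved, stated in full; the proofs are below) =====
def Claim_equal_extract_import : Prop := ∀ (line : String), Dom_extract_import line → Spec_extract_import line (extract_import line)

-- ===== LEMMAS AND PROOFS =====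

-- A's scan stops at the first quote at or after i (index l if there is none): findIdx on the dropped tail.
theorem scanQuote_eq_aux (cs : List Char) (n : Nat) :
    ∀ i, cs.length - i ≤ n → scanQuote cs cs.length i = i + (cs.drop i).findIdx isQuote := by
  induction n with
  | zero =>
    intro i h
    have hni : ¬ i < cs.length := by omega
    rw [scanQuote]
    simp [hni, List.drop_eq_nil_of_le (by omega : cs.length ≤ i)]
  | succ n ih =>
    intro i h
    rw [scanQuote]
    by_cases hi : i < cs.length
    · have hd : cs.drop i = cs[i] :: cs.drop (i + 1) := List.drop_eq_getElem_cons hi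
      have hg : cs.getD i ' ' = cs[i] := by
        rw [List.getD_eq_getElem?_getD, List.getElem?_eq_getElem hi]; rfl
      rw [hd, List.findIdx_cons, hg]
      by_cases hq : isQuote cs[i]
      · simp [hi, hq]
      · simp only [hi, dif_pos, hq, if_neg, cond_false, Bool.false_eq_true, not_false_iff]
        rw [ih (i + 1) (by omega)]
        omega
    · simp [hi, List.drop_eq_nil_of_le (by omega : cs.length ≤ i)]

theorem scanQuote_eq (cs : List Char) (i : Nat) :
    scanQuote cs cs.length i = i + (cs.drop i).findIdx isQuote :=
  scanQuote_eq_aux cs (cs.length - i) i le_rfl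

-- B's partition, characterised by findIdx: what comes back is the prefix before the first
-- separator, and (when the separator occurs) the suffix after it.
theorem partChar_eq (q : Char) : ∀ (cs : List Char),
    partChar cs q = (cs.take (cs.findIdx (fun c => c = q)),
      if cs.findIdx (fun c => c = q) < cs.length then
        some (cs.drop (cs.findIdx (fun c => c = q) + 1)) else none) := by
  intro cs
  induction cs with
  | nil => simp [partChar]
  | cons c rest ih =>
    rw [partChar, List.findIdx_cons]
    by_cases hc : c = q
    · simp [hc]
    · simp only [hc, decide_false, cond_false, if_neg, not_false_iff]
      rw [ih]
      by_cases hf : rest.findIdx (fun c => c = q) < rest.length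
      · have h2 : rest.findIdx (fun c => c = q) + 1 < rest.length + 1 := by omega
        simp [hf, h2]
      · have h2 : ¬ (rest.findIdx (fun c => c = q) + 1 < rest.length + 1) := by omega
        simp [hf, h2]

-- a character maps to the single quote exactly when it is one of the two quote characters
theorem normQuote_pred : (fun c => decide (normQuote c = '\'')) = isQuote := by
  funext c
  by_cases h : c = '"' <;> simp [normQuote, isQuote, h]

-- normalisation is the identity on the quote-free prefix up to the first quote
theorem map_norm_take_findIdx : ∀ (xs : List Char),
    (xs.take (xs.findIdx isQuote)).map normQuote = xs.take (xs.findIdx isQuote) := by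
  intro xs
  induction xs with
  | nil => simp
  | cons c rest ih =>
    rw [List.findIdx_cons]
    by_cases hq : isQuote c
    · simp [hq]
    · have hc : normQuote c = c := by
        have : ¬ c = '"' := by simp [isQuote] at hq; exact hq.2
        simp [normQuote, this]
      simp only [hq, cond_false, List.take_succ_cons, List.map_cons, hc]
      rw [ih]

-- ===== VERDICT (by name: the statement is the Claim_ definition above) =====
theorem extract_import_spec : Claim_equal_extract_import := by
  intro line _
  unfold Spec_extract_import
  have hoff : (if PySem.Str.startswith line "@require" then (8 : Int) else 7)
      = ((if PySem.Str.startswith line "@require" then (8 : Nat) else 7 : Nat) : Int) := by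
    by_cases hb : PySem.Str.startswith line "@require" <;> simp only [hb, if_true] <;> norm_num
  unfold extract_import extract_import_alt
  rw [hoff, PySem.List.slice_from_natCast]
  dsimp only
  set cs := line.toList with hcs
  set off : Nat := if PySem.Str.startswith line "@require" then 8 else 7 with hoffdef
  set t := cs.drop off with ht
  set k1 := t.findIdx isQuote with hk1
  set t' := t.drop (k1 + 1) with ht'
  set k2 := t'.findIdx isQuote with hk2
  have hlen : t.length = cs.length - off := by rw [ht]; simp
  have hlen' : t'.length = t.length - (k1 + 1) := by rw [ht']; simp
  have hk1le : k1 ≤ t.length := List.findIdx_le_length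
  have hk2le : k2 ≤ t'.length := List.findIdx_le_length
  have hscan1 : scanQuote cs cs.length off = off + k1 := scanQuote_eq cs off
  -- the first findIdx on the normalised tail is k1
  have hfind1 : (t.map normQuote).findIdx (fun c => c = '\'') = k1 := by
    rw [List.findIdx_map]
    rw [show ((fun c => decide (c = '\'')) ∘ normQuote) = isQuote from normQuote_pred]
  have hrest : (t.map normQuote).drop (k1 + 1) = t'.map normQuote := by
    exact List.map_drop.symm
  have hfind2 : (t'.map normQuote).findIdx (fun c => c = '\'') = k2 := by
    rw [List.findIdx_map]
    rw [show ((fun c => decide (c = '\'')) ∘ normQuote) = isQuote from normQuote_pred]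
  rw [hscan1, partChar_eq, hfind1]
  simp only [List.length_map]
  by_cases h1 : k1 < t.length
  · -- the directive has a first quote
    have hoffl : off < cs.length := by omega
    have hdd : cs.drop (off + k1 + 1) = t' := by
      rw [ht', ht, List.drop_drop]
      congr 1
    have hscan2 : scanQuote cs cs.length (off + k1 + 1) = off + k1 + 1 + k2 := by
      rw [scanQuote_eq, hdd]
    rw [if_pos h1, hrest]
    dsimp only
    rw [partChar_eq, hfind2]
    simp only [List.length_map]
    by_cases h2 : k2 < t'.length
    · rw [if_pos h2]
      dsimp only
      rw [if_neg (show ¬ (off + k1 + 1 ≥ cs.length) by omega), hscan2,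
        if_neg (show ¬ (off + k1 + 1 + k2 ≥ cs.length) by omega)]
      congr 2
      rw [PySem.List.slice_natCast,
        show (off + k1 + 1 + k2) - (off + k1 + 1) = k2 by omega, hdd, hk2,
        ← List.map_take, map_norm_take_findIdx]
    · rw [if_neg h2]
      dsimp only
      by_cases hstart : off + k1 + 1 ≥ cs.length
      · rw [if_pos hstart]
      · rw [if_neg hstart, hscan2, if_pos (show off + k1 + 1 + k2 ≥ cs.length by omega)]
  · -- no quote at all after the directive
    rw [if_neg h1]
    dsimp only
    rw [if_pos (show off + k1 + 1 ≥ cs.length by omega)]
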